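-- pv_equiv track=rewrite | github.com/varshini/machine_learning | Decision_Trees/decisionTree.py | featureAnalysis
-- ===== SOURCE A (Python) =====
-- positives = ["yes", "democrat", "A", "+"]
--
-- def featureAnalysis(cohort, index) :
--     posFeat, negFeat = "", ""
--     posNumY, posNumN, negNumY, negNumN = 0, 0, 0, 0
--     for member in cohort :
--         if posFeat == "" : posFeat = member[index]
--         elif negFeat == "" and posFeat != member[index] : negFeat = member[index]
--         if member[index] == posFeat :
--             if member[-1] in positives : posNumY += 1
--             else : posNumN += 1
--         else : # member[index] = negFeat
--             if member[-1] in positives : negNumY += 1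
--             else : negNumN += 1
--     if posNumY > negNumY : return posFeat, negFeat, posNumY, posNumN, negNumY, negNumN
--     else : return negFeat, posFeat, negNumY, negNumN, posNumY, posNumN
-- ===== SOURCE B (Python) =====
-- positives = ["yes", "democrat", "A", "+"]
--
-- def featureAnalysis(cohort, index):
--     if not cohort:
--         return "", "", 0, 0, 0, 0
--     posFeat = cohort[0][index]
--     negFeat = next((m[index] for m in cohort if m[index] != posFeat), "")
--     posNumY = sum(1 for m in cohort if m[index] == posFeat and m[-1] in positives)
--     posNumN = sum(1 for m in cohort if m[index] == posFeat and m[-1] not in positives)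
--     negNumY = sum(1 for m in cohort if m[index] != posFeat and m[-1] in positives)
--     negNumN = sum(1 for m in cohort if m[index] != posFeat and m[-1] not in positives)
--     if posNumY > negNumY:
--         return posFeat, negFeat, posNumY, posNumN, negNumY, negNumN
--     return negFeat, posFeat, negNumY, negNumN, posNumY, posNumN
-- ===== Notes on version B (the rewrite author's own statement) =====
-- stated objective: simpler
-- what changed: Replaces A's single stateful loop with mutable sentinel variables by a staged decomposition: posFeat from the first row, negFeat by a first-difference search, and the four counts as four independent filtered tallies.
-- outside the precondition, e.g. on featureAnalysis([['', 'yes'], ['b', 'no']], 0): A returns ('b', '', 1, 1, 0, 0), B returns ('', 'b', 1, 0, 0, 1)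
import Mathlib
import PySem

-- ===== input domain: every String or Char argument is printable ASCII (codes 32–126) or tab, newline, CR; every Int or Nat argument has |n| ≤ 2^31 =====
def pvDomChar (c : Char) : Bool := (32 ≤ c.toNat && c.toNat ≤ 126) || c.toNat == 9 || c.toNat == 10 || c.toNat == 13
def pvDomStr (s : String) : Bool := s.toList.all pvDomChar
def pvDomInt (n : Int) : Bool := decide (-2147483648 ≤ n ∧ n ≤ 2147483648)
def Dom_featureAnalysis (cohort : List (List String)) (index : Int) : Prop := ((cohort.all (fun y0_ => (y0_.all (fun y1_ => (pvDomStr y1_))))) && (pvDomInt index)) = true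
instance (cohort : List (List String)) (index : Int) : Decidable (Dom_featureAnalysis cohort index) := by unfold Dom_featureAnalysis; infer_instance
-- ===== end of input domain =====

-- B replaces A's single stateful loop (mutable "" sentinels) by staged passes: first feature,
-- first-difference search, four filtered tallies; objective: simpler decomposition, same cost.

-- ===== PORT A =====
def pvPositives : List String := ["yes", "democrat", "A", "+"]

-- member[index] / member[-1]; under Pre_ the lookups are always `some`, `getD ""` only totalizes
def pvVal (index : Int) (member : List String) : String :=
  (PySem.List.pyGet? member index).getD ""

def pvLab (member : List String) : String :=
  (PySem.List.pyGet? member (-1)).getD ""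

def pvStepA (index : Int) (st : String × String × Int × Int × Int × Int)
    (member : List String) : String × String × Int × Int × Int × Int :=
  let (posFeat, negFeat, posNumY, posNumN, negNumY, negNumN) := st
  let posFeat := if posFeat = "" then pvVal index member else posFeat
  let negFeat := if posFeat = "" then negFeat
                 else if negFeat = "" ∧ posFeat ≠ pvVal index member then pvVal index member
                 else negFeat
  if pvVal index member = posFeat then
    if pvLab member ∈ pvPositives then (posFeat, negFeat, posNumY + 1, posNumN, negNumY, negNumN)
    else (posFeat, negFeat, posNumY, posNumN + 1, negNumY, negNumN)
  else
    if pvLab member ∈ pvPositives then (posFeat, negFeat, posNumY, posNumN, negNumY + 1, negNumN)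
    else (posFeat, negFeat, posNumY, posNumN, negNumY, negNumN + 1)

def featureAnalysis (cohort : List (List String)) (index : Int) : String × String × Int × Int × Int × Int :=
  let (posFeat, negFeat, posNumY, posNumN, negNumY, negNumN) :=
    cohort.foldl (pvStepA index) ("", "", 0, 0, 0, 0)
  if posNumY > negNumY then (posFeat, negFeat, posNumY, posNumN, negNumY, negNumN)
  else (negFeat, posFeat, negNumY, negNumN, posNumY, posNumN)

-- ===== PORT B =====
def featureAnalysis_alt (cohort : List (List String)) (index : Int) : String × String × Int × Int × Int × Int :=
  match cohort with
  | [] => ("", "", 0, 0, 0, 0)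
  | first :: _ =>
    let posFeat := pvVal index first
    let negFeat := ((cohort.find? (fun m => pvVal index m ≠ posFeat)).map (pvVal index)).getD ""
    let posNumY : Int := cohort.countP (fun m => pvVal index m = posFeat ∧ pvLab m ∈ pvPositives)
    let posNumN : Int := cohort.countP (fun m => pvVal index m = posFeat ∧ pvLab m ∉ pvPositives)
    let negNumY : Int := cohort.countP (fun m => pvVal index m ≠ posFeat ∧ pvLab m ∈ pvPositives)
    let negNumN : Int := cohort.countP (fun m => pvVal index m ≠ posFeat ∧ pvLab m ∉ pvPositives)
    if posNumY > negNumY then (posFeat, negFeat, posNumY, posNumN, negNumY, negNumN)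
    else (negFeat, posFeat, negNumY, negNumN, posNumY, posNumN)

-- ===== PRECONDITION & SPEC =====
-- Pre_ excludes members on which indexing raises (index out of range; Python IndexError) and,
-- additionally, members whose feature value at `index` is the empty string: "" collides with A's
-- ""-sentinel for an unset posFeat/negFeat, so A's pos/neg split there is an accident of its
-- implementation and both behaviours are defensible.
def Pre_featureAnalysis (cohort : List (List String)) (index : Int) : Prop :=
  ∀ m ∈ cohort, m ≠ [] ∧ (PySem.List.pyGet? m index).isSome ∧ PySem.List.pyGet? m index ≠ some ""
instance (cohort : List (List String)) (index : Int) : Decidable (Pre_featureAnalysis cohort index) := by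
  unfold Pre_featureAnalysis; infer_instance

def pvWitness_featureAnalysis : List (List String) × Int :=
  ([["a", "yes"], ["b", "no"], ["a", "yes"]], 0)

def Spec_featureAnalysis (cohort : List (List String)) (index : Int) (out : String × String × Int × Int × Int × Int) : Prop := out = featureAnalysis_alt cohort index
instance (cohort : List (List String)) (index : Int) (out : String × String × Int × Int × Int × Int) : Decidable (Spec_featureAnalysis cohort index out) := by unfold Spec_featureAnalysis; infer_instance

-- ===== CLAIM (what is proved, stated in full; the proofs are below) =====
def Claim_equal_featureAnalysis : Prop := ∀ (cohort : List (List String)) (index : Int), Dom_featureAnalysis cohort index → Pre_featureAnalysis cohort index → Spec_featureAnalysis cohort index (featureAnalysis cohort index)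

-- ===== LEMMAS AND PROOFS =====

-- Invariant of A's loop once posFeat has been set to a non-empty value.
theorem pvLoopInv (index : Int) (cohort : List (List String))
    (pf nf : String) (py pn ny nn : Int)
    (hpf : pf ≠ "") (hvals : ∀ m ∈ cohort, pvVal index m ≠ "") :
    cohort.foldl (pvStepA index) (pf, nf, py, pn, ny, nn) =
      (pf,
       (if nf = "" then ((cohort.find? (fun m => pvVal index m ≠ pf)).map (pvVal index)).getD "" else nf),
       py + (cohort.countP (fun m => pvVal index m = pf ∧ pvLab m ∈ pvPositives) : Nat),
       pn + (cohort.countP (fun m => pvVal index m = pf ∧ pvLab m ∉ pvPositives) : Nat),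
       ny + (cohort.countP (fun m => pvVal index m ≠ pf ∧ pvLab m ∈ pvPositives) : Nat),
       nn + (cohort.countP (fun m => pvVal index m ≠ pf ∧ pvLab m ∉ pvPositives) : Nat)) := by
  induction cohort generalizing nf py pn ny nn with
  | nil => simp
  | cons m rest ih =>
    have hm : pvVal index m ≠ "" := hvals m (by simp)
    have hrest : ∀ x ∈ rest, pvVal index x ≠ "" := fun x hx => hvals x (by simp [hx])
    simp only [List.foldl_cons]
    by_cases hv : pvVal index m = pf
    · have hne : ¬ (nf = "" ∧ pf ≠ pvVal index m) := by
        rintro ⟨-, h2⟩; exact h2 hv.symm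
      rw [show pvStepA index (pf, nf, py, pn, ny, nn) m =
            (if pvLab m ∈ pvPositives then (pf, nf, py + 1, pn, ny, nn)
             else (pf, nf, py, pn + 1, ny, nn)) from by simp [pvStepA, hpf, hv]]
      by_cases hl : pvLab m ∈ pvPositives <;>
        simp only [hl, if_true, if_false] <;>
        rw [ih nf _ _ _ _ hrest] <;>
        simp [List.find?, hv, hl, Prod.ext_iff] <;> omega
    · have hc : pf ≠ pvVal index m := fun h => hv h.symm
      by_cases hnf : nf = ""
      · rw [show pvStepA index (pf, nf, py, pn, ny, nn) m =
              (if pvLab m ∈ pvPositives then (pf, pvVal index m, py, pn, ny + 1, nn)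
               else (pf, pvVal index m, py, pn, ny, nn + 1)) from by
            simp [pvStepA, hpf, hv, hnf, hc]]
        by_cases hl : pvLab m ∈ pvPositives <;>
          simp only [hl, if_true, if_false] <;>
          rw [ih (pvVal index m) _ _ _ _ hrest] <;>
          simp [List.find?, hv, hl, hm, hnf, Prod.ext_iff] <;> omega
      · rw [show pvStepA index (pf, nf, py, pn, ny, nn) m =
              (if pvLab m ∈ pvPositives then (pf, nf, py, pn, ny + 1, nn)
               else (pf, nf, py, pn, ny, nn + 1)) from by simp [pvStepA, hpf, hv, hnf]]
        by_cases hl : pvLab m ∈ pvPositives <;>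
          simp only [hl, if_true, if_false] <;>
          rw [ih nf _ _ _ _ hrest] <;>
          simp [hv, hl, hnf, Prod.ext_iff] <;> omega

-- ===== VERDICT (by name: the statement is the Claim_ definition above) =====
theorem featureAnalysis_spec : Claim_equal_featureAnalysis := by
  intro cohort index _ hpre
  unfold Spec_featureAnalysis featureAnalysis featureAnalysis_alt
  match cohort with
  | [] => simp
  | first :: rest =>
    have hvals : ∀ m ∈ (first :: rest), pvVal index m ≠ "" := by
      intro m hm
      have h := hpre m hm
      unfold pvVal
      rcases Option.isSome_iff_exists.mp h.2.1 with ⟨v, hvm⟩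
      simp [hvm]; rintro rfl; exact h.2.2 hvm
    have hv1 : pvVal index first ≠ "" := hvals first (by simp)
    have hrest : ∀ m ∈ rest, pvVal index m ≠ "" := fun m hm => hvals m (by simp [hm])
    simp only [List.foldl_cons]
    rw [show pvStepA index ("", "", 0, 0, 0, 0) first =
          (if pvLab first ∈ pvPositives then (pvVal index first, "", 1, 0, 0, 0)
           else (pvVal index first, "", 0, 1, 0, 0)) from by simp [pvStepA, hv1]]
    by_cases hl : pvLab first ∈ pvPositives <;>
      simp only [hl, if_true, if_false] <;>
      rw [pvLoopInv index rest (pvVal index first) "" _ _ _ _ hv1 hrest] <;>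
      simp [List.find?, hl, Int.add_comm]
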